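-- pv_equiv track=rewrite | github.com/zuraenee/Ocado-MajorityArrow-CodilityAssesment | code.py | solution
-- ===== SOURCE A (Python) =====
-- def solution(S):
--     up_counter = 0
--     down_counter = 0
--     right_counter = 0
--     left_counter = 0
--     """ Counting Section """
--     for entry in S:
--         if entry == "^":
--             up_counter += 1
--         elif entry == ">":
--             right_counter += 1
--         elif entry == "<":
--             left_counter += 1
--         elif entry == "v":
--             down_counter += 1
--     max_counter = max([up_counter, down_counter, right_counter, left_counter])
--     return len(S) - max_counter
-- ===== SOURCE B (Python) =====
-- def solution(S):
--     # For each candidate target arrow, count how many entries would have to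
--     # change (everything that is not that arrow); the answer is the cheapest.
--     return min(sum(1 for entry in S if entry != target) for target in "^>v<")
-- ===== Notes on version B (the rewrite author's own statement) =====
-- stated objective: alternative
-- what changed: Instead of building counts of matches per direction and subtracting the maximum from len(S), B computes for each of the four target arrows the number of mismatching entries directly and returns the minimum of those four costs; there are no counters, no len(S), no per-character four-way branch and no max.
import Mathlib
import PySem

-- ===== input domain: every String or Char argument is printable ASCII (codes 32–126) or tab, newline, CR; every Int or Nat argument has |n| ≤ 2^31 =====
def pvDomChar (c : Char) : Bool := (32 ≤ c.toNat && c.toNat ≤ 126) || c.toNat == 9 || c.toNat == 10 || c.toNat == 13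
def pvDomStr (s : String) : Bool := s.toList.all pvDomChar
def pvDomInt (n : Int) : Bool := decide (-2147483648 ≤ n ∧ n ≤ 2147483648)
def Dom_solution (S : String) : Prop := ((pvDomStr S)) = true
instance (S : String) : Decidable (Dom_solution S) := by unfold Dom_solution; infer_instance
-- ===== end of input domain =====

-- B computes, per candidate target arrow, the number of mismatching entries and returns the minimum of the four costs (no counters, no len-max). Objective: alternative.


-- ===== PORT A =====
def solution (S : String) : Int :=
  let st := S.toList.foldl
    (fun (st : Int × Int × Int × Int) entry =>
      let (u, d, r, l) := st
      if entry = '^' then (u + 1, d, r, l)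
      else if entry = '>' then (u, d, r + 1, l)
      else if entry = '<' then (u, d, r, l + 1)
      else if entry = 'v' then (u, d + 1, r, l)
      else (u, d, r, l))
    (0, 0, 0, 0)
  let maxCounter := max st.1 (max st.2.1 (max st.2.2.1 st.2.2.2))
  PySem.Str.len S - maxCounter

-- ===== PORT B =====
-- sum(1 for entry in S if entry != target)
def pvMismatches (S : String) (target : Char) : Int :=
  S.toList.foldl (fun acc entry => if entry ≠ target then acc + 1 else acc) 0

def solution_alt (S : String) : Int :=
  match PySem.List.min? (("^>v<".toList).map (pvMismatches S)) (fun x => x) with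
  | some m => m
  | none => 0

-- ===== PRECONDITION & SPEC =====
def Spec_solution (S : String) (out : Int) : Prop := out = solution_alt S
instance (S : String) (out : Int) : Decidable (Spec_solution S out) := by unfold Spec_solution; infer_instance

-- ===== CLAIM =====
def Claim_equal_solution : Prop := ∀ (S : String), Dom_solution S → Spec_solution S (solution S)

-- ===== LEMMAS AND PROOFS =====

-- A's counting loop: each component is the initial value plus the count of its arrow.
theorem solution_fold_counts (l : List Char) (u d r lf : Int) :
    l.foldl
      (fun (st : Int × Int × Int × Int) entry =>
        let (u, d, r, l) := st
        if entry = '^' then (u + 1, d, r, l)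
        else if entry = '>' then (u, d, r + 1, l)
        else if entry = '<' then (u, d, r, l + 1)
        else if entry = 'v' then (u, d + 1, r, l)
        else (u, d, r, l))
      (u, d, r, lf)
    = (u + l.count '^', d + l.count 'v', r + l.count '>', lf + l.count '<') := by
  induction l generalizing u d r lf with
  | nil => simp
  | cons x xs ih =>
    simp only [List.foldl_cons, List.count_cons]
    by_cases h1 : x = '^'
    · subst h1; simp [ih]; omega
    · by_cases h2 : x = '>'
      · subst h2; simp [h1, ih]; omega
      · by_cases h3 : x = '<'
        · subst h3; simp [h1, h2, ih]; omega
        · by_cases h4 : x = 'v'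
          · subst h4; simp [h1, h2, h3, ih]; omega
          · simp [h1, h2, h3, h4, ih]

-- B's mismatch loop: length minus the count of the target character.
theorem pvMismatches_eq (l : List Char) (t : Char) (acc : Int) :
    l.foldl (fun acc entry => if entry ≠ t then acc + 1 else acc) acc
      = acc + (l.length : Int) - (l.count t : Int) := by
  induction l generalizing acc with
  | nil => simp
  | cons x xs ih =>
    simp only [List.foldl_cons, List.count_cons, List.length_cons]
    by_cases h : x = t
    · subst h; rw [if_neg (by simp), ih]; simp; omega
    · rw [if_pos h, ih]; simp [h]; omega

-- ===== VERDICT =====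
theorem solution_spec : Claim_equal_solution := by
  intro S _
  unfold Spec_solution solution solution_alt pvMismatches
  rw [solution_fold_counts]
  simp only [show ("^>v<".toList) = ['^', '>', 'v', '<'] from rfl, List.map_cons,
    List.map_nil, PySem.List.min?_id_cons, List.foldl_cons, List.foldl_nil]
  rw [pvMismatches_eq, pvMismatches_eq, pvMismatches_eq, pvMismatches_eq]
  simp [PySem.Str.len]
  omega
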